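-- pv_equiv track=rewrite | github.com/pandas-dev/pandas | venv/lib/python3.12/site-packages/xarray/groupers.py | is_sorted_periodic
-- ===== SOURCE A (Python) =====
-- def is_sorted_periodic(lst):
--     """Used to verify that seasons provided to SeasonResampler are in order."""
--     n = len(lst)
--
--     # Find the wraparound point where the list decreases
--     wrap_point = -1
--     for i in range(1, n):
--         if lst[i] < lst[i - 1]:
--             wrap_point = i
--             break
--
--     # If no wraparound point is found, the list is already sorted
--     if wrap_point == -1:
--         return True
--
--     # Check if both parts around the wrap point are sorted
--     for i in range(1, wrap_point):
--         if lst[i] < lst[i - 1]: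
--             return False
--     for i in range(wrap_point + 1, n):
--         if lst[i] < lst[i - 1]:
--             return False
--
--     # Check wraparound condition
--     return lst[-1] <= lst[0]
-- ===== SOURCE B (Python) =====
-- def is_sorted_periodic(lst):
--     """Used to verify that seasons provided to SeasonResampler are in order."""
--     n = len(lst)
--     if n <= 1:
--         return True
--     descents = sum(lst[i] < lst[i - 1] for i in range(1, n))
--     return descents + (1 if lst[-1] > lst[0] else 0) <= 1
-- ===== Notes on version B (the rewrite author's own statement) =====
-- stated objective: simpler
-- what changed: Replaces the find-pivot-then-validate-two-segments structure with a single pass that counts descents, adds the endpoint wraparound drop, and tests the total against a threshold of 1.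
import Mathlib
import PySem

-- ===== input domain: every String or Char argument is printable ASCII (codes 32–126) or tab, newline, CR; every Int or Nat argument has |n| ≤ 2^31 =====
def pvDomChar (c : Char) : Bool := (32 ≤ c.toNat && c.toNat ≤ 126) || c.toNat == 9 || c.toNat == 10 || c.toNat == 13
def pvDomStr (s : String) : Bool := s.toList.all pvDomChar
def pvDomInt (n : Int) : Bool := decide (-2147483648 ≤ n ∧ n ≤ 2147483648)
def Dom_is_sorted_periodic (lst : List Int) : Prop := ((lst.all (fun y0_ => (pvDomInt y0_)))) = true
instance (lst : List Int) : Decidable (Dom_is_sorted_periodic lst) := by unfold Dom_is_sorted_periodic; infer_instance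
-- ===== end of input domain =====

-- B replaces A's find-pivot-then-validate-two-segments scan by one descent-counting pass
-- plus a threshold test — simpler decomposition, same O(n) cost; return value only, no mutation.

-- ===== PORT A =====
-- the 'for i in range(1, n): if lst[i] < lst[i-1]: wrap_point = i; break' loop;
-- indices i and i-1 are always in range here, so pyGetD with default 0 is exact.
def pvFindWrap (lst : List Int) : List Int → Int
  | [] => -1
  | i :: rest =>
    if PySem.List.pyGetD lst i 0 < PySem.List.pyGetD lst (i-1) 0 then i
    else pvFindWrap lst rest

def is_sorted_periodic (lst : List Int) : Bool :=
  let n : Int := lst.length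
  let wrap := pvFindWrap lst (PySem.List.pyRange 1 n 1)
  if wrap = -1 then true
  else if (PySem.List.pyRange 1 wrap 1).all
      (fun i => !(PySem.List.pyGetD lst i 0 < PySem.List.pyGetD lst (i-1) 0)) then
    if (PySem.List.pyRange (wrap + 1) n 1).all
        (fun i => !(PySem.List.pyGetD lst i 0 < PySem.List.pyGetD lst (i-1) 0)) then
      decide (PySem.List.pyGetD lst (-1) 0 ≤ PySem.List.pyGetD lst 0 0)
    else false
  else false

-- ===== PORT B =====
def is_sorted_periodic_alt (lst : List Int) : Bool :=
  if lst.length ≤ 1 then true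
  else
    let n : Int := lst.length
    let descents : Int :=
      ((PySem.List.pyRange 1 n 1).map
        (fun i => if PySem.List.pyGetD lst i 0 < PySem.List.pyGetD lst (i-1) 0 then (1 : Int) else 0)).sum
    decide (descents + (if PySem.List.pyGetD lst 0 0 < PySem.List.pyGetD lst (-1) 0 then (1 : Int) else 0) ≤ 1)

-- ===== PRECONDITION & SPEC =====
def Spec_is_sorted_periodic (lst : List Int) (out : Bool) : Prop := out = is_sorted_periodic_alt lst
instance (lst : List Int) (out : Bool) : Decidable (Spec_is_sorted_periodic lst out) := by unfold Spec_is_sorted_periodic; infer_instance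

-- ===== CLAIM (what is proved, stated in full; the proofs are below) =====
def Claim_equal_is_sorted_periodic : Prop := ∀ (lst : List Int), Dom_is_sorted_periodic lst → Spec_is_sorted_periodic lst (is_sorted_periodic lst)

-- ===== LEMMAS AND PROOFS =====

-- A's break-loop is first-match search: pvFindWrap is `find?` with default -1.
theorem pvFindWrap_eq_find? (lst : List Int) (is : List Int) :
    pvFindWrap lst is =
      ((is.find? (fun i => decide (PySem.List.pyGetD lst i 0 < PySem.List.pyGetD lst (i-1) 0))).getD (-1)) := by
  induction is with
  | nil => rfl
  | cons i rest ih =>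
    simp only [pvFindWrap, List.find?_cons]
    by_cases h : PySem.List.pyGetD lst i 0 < PySem.List.pyGetD lst (i-1) 0 <;> simp [h, ih]

theorem is_sorted_periodic_eq_alt (lst : List Int) :
    is_sorted_periodic lst = is_sorted_periodic_alt lst := by
  set p : Int → Bool := fun i => decide (PySem.List.pyGetD lst i 0 < PySem.List.pyGetD lst (i-1) 0) with hp
  set n : Int := (lst.length : Int) with hn
  set r : List Int := PySem.List.pyRange 1 n 1 with hr
  have hsum : ((r.map (fun i => if PySem.List.pyGetD lst i 0 < PySem.List.pyGetD lst (i-1) 0 then (1 : Int) else 0)).sum)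
      = ((r.countP p : Nat) : Int) := by
    rw [← PySem.List.sum_map_ite_one_zero p r]
    simp only [hp, decide_eq_true_eq]
  rcases hfind : r.find? p with _ | w
  · -- no descent: A returns True at the first branch; B's descent count is 0.
    have hall : ∀ x ∈ r, ¬ p x = true := List.find?_eq_none.mp hfind
    have hcount : r.countP p = 0 := List.countP_eq_zero.mpr hall
    simp only [is_sorted_periodic, is_sorted_periodic_alt, ← hn, ← hr,
      pvFindWrap_eq_find? lst r, hp] at *
    rw [hfind]
    simp only [Option.getD_none, if_true]
    by_cases hlen : lst.length ≤ 1
    · simp [hlen]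
    · simp only [hlen, if_false]
      rw [hsum, hcount]
      split_ifs <;> simp
  · -- first descent at w
    have hpw : p w = true := List.find?_some hfind
    have hwmem : w ∈ r := List.mem_of_find?_eq_some hfind
    have hwb : 1 ≤ w ∧ w < n := by
      rw [hr] at hwmem; exact (PySem.List.mem_pyRange_one).mp hwmem
    have hsplit : r = PySem.List.pyRange 1 w 1 ++ PySem.List.pyRange w n 1 := by
      rw [hr]; exact PySem.List.pyRange_one_append 1 w n hwb.1 (le_of_lt hwb.2)
    have hcons : PySem.List.pyRange w n 1 = w :: PySem.List.pyRange (w+1) n 1 :=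
      PySem.List.pyRange_one_cons hwb.2
    -- the segment before w has no descent (w is the FIRST match)
    have hpre : (PySem.List.pyRange 1 w 1).find? p = none := by
      rcases hx : (PySem.List.pyRange 1 w 1).find? p with _ | x
      · rfl
      · exfalso
        have : r.find? p = some x := by
          rw [hsplit, List.find?_append, hx]; rfl
        have hxw : x = w := by rw [this] at hfind; exact (Option.some.injEq _ _).mp hfind
        have hxmem := List.mem_of_find?_eq_some hx
        have := (PySem.List.mem_pyRange_one).mp hxmem
        omega
    have hallpre : ∀ x ∈ PySem.List.pyRange 1 w 1, ¬ p x = true := List.find?_eq_none.mp hpre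
    have hcountpre : (PySem.List.pyRange 1 w 1).countP p = 0 := List.countP_eq_zero.mpr hallpre
    have hcount : r.countP p = 1 + (PySem.List.pyRange (w+1) n 1).countP p := by
      rw [hsplit, hcons, List.countP_append, List.countP_cons, hcountpre, hpw]
      simp; omega
    have hlen2 : ¬ lst.length ≤ 1 := by
      have := hwb.1; have := hwb.2; rw [hn] at *; omega
    simp only [is_sorted_periodic, is_sorted_periodic_alt, ← hn, ← hr,
      pvFindWrap_eq_find? lst r]
    rw [hfind]
    simp only [Option.getD_some, hlen2, if_false]
    have hwne : ¬ (w = -1) := by omega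
    rw [if_neg hwne]
    have hallpre' : (PySem.List.pyRange 1 w 1).all
        (fun i => !(decide (PySem.List.pyGetD lst i 0 < PySem.List.pyGetD lst (i-1) 0))) = true := by
      rw [List.all_eq_true]; intro x hx
      have := hallpre x hx; rw [hp] at this; simpa using this
    rw [if_pos (by simpa using hallpre')]
    rw [hsum, hcount]
    by_cases htail : (PySem.List.pyRange (w+1) n 1).all
        (fun i => !(decide (PySem.List.pyGetD lst i 0 < PySem.List.pyGetD lst (i-1) 0))) = true
    · have hz : (PySem.List.pyRange (w+1) n 1).countP p = 0 := by
        rw [List.countP_eq_zero]; intro x hx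
        have := (List.all_eq_true).mp htail x hx
        rw [hp]; simpa using this
      rw [if_pos (by simpa using htail), hz]
      by_cases hLF : PySem.List.pyGetD lst (-1) 0 ≤ PySem.List.pyGetD lst 0 0
      · have h2 : ¬ (PySem.List.pyGetD lst 0 0 < PySem.List.pyGetD lst (-1) 0) := by omega
        rw [if_neg h2]
        norm_num [hLF]
      · have h2 : PySem.List.pyGetD lst 0 0 < PySem.List.pyGetD lst (-1) 0 := by omega
        rw [if_pos h2]
        norm_num [hLF]
    · have hex : ∃ x ∈ PySem.List.pyRange (w+1) n 1, p x = true := by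
        by_contra hno
        push Not at hno
        exact htail (List.all_eq_true.mpr (by intro x hx; simpa [hp] using hno x hx))
      have hpos := List.countP_pos_iff.mpr hex
      rw [if_neg (by simpa using htail)]
      symm
      rw [decide_eq_false_iff_not]
      split_ifs <;> push_cast <;> omega

-- ===== VERDICT (by name: the statement is the Claim_ definition above) =====
theorem is_sorted_periodic_spec : Claim_equal_is_sorted_periodic := by
  intro lst _
  unfold Spec_is_sorted_periodic
  exact is_sorted_periodic_eq_alt lst
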